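-- pv_equiv track=rewrite | github.com/iam52/coding_everyday | 프로그래머스/0/181851. 전국 대회 선발 고사/전국 대회 선발 고사.py | solution
-- ===== SOURCE A (Python) =====
-- def solution(rank, attendance):
--     answer = 0
--     temp = []
--     for idx, value in enumerate(attendance):
--         if value == True:
--             temp.append(rank[idx])
--             temp.sort()
--     temp2 = []
--     for i in temp[:3]:
--         for j in range(len(rank)):
--             if i == rank[j]:
--                 temp2.append(j)
--     answer = temp2[0]*10000 + temp2[1]*100 + temp2[2]
--     return answer
-- ===== SOURCE B (Python) =====
-- def solution(rank, attendance):
--     v1 = v2 = v3 = None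
--     for i, present in enumerate(attendance):
--         if present == True:
--             r = rank[i]
--             if v1 is None or r < v1:
--                 v1, v2, v3 = r, v1, v2
--             elif v2 is None or r < v2:
--                 v2, v3 = r, v2
--             elif v3 is None or r < v3:
--                 v3 = r
--     p1, p2, p3 = [], [], []
--     for j, r in enumerate(rank):
--         if r == v1:
--             p1.append(j)
--         if r == v2:
--             p2.append(j)
--         if r == v3:
--             p3.append(j)
--     out = p1 + p2 + p3
--     return out[0] * 10000 + out[1] * 100 + out[2]
-- ===== Notes on version B (the rewrite author's own statement) =====
-- stated objective: faster
-- what changed: B never sorts and never back-searches: one pass keeps the three smallest attending rank values in three registers (selection, replacing A's re-sort of the collected list after every append), then a single enumerate pass over rank fills one position bucket per register simultaneously (replacing A's per-value rescans of rank), and the answer is read off the concatenated buckets.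
import Mathlib
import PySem

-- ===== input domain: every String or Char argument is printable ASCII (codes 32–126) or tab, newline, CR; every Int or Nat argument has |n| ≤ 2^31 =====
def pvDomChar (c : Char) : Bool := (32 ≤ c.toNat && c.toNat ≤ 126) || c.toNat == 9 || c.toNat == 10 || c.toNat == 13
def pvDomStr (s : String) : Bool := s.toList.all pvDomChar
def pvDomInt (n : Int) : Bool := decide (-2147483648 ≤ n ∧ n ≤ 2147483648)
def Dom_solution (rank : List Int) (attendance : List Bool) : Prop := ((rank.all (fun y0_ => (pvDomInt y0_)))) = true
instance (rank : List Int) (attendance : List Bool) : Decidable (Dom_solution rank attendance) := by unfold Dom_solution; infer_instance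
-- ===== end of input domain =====

-- B replaces A's repeated sorting and per-value back-search by three selection registers
-- and one simultaneous bucket sweep over rank.

-- ===== PORT A =====
def solution (rank : List Int) (attendance : List Bool) : Int :=
  let temp : List Int := (PySem.List.enumerate attendance 0).foldl
    (fun temp p =>
      if p.2 == true then
        PySem.List.sorted (temp ++ [PySem.List.pyGetD rank p.1 0]) (fun x => x) false
      else temp) []
  let temp2 : List Int := (PySem.List.slice temp none (some 3)).foldl
    (fun t2 i =>
      (PySem.List.pyRange 0 (rank.length : Int) 1).foldl
        (fun t2 j => if i == PySem.List.pyGetD rank j 0 then t2 ++ [j] else t2) t2) []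
  PySem.List.pyGetD temp2 0 0 * 10000 + PySem.List.pyGetD temp2 1 0 * 100 + PySem.List.pyGetD temp2 2 0

-- ===== PORT B =====
-- one loop body of Source B's first pass: update the three value registers with r
def pvStep (s : Option Int × Option Int × Option Int) (r : Int) :
    Option Int × Option Int × Option Int :=
  if (match s.1 with | none => true | some x => decide (r < x)) then (some r, s.1, s.2.1)
  else if (match s.2.1 with | none => true | some x => decide (r < x)) then (s.1, some r, s.2.1)
  else if (match s.2.2 with | none => true | some x => decide (r < x)) then (s.1, s.2.1, some r)
  else s

-- Python's `r == v` against a register that may still be None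
def pvIsReg (o : Option Int) (r : Int) : Bool :=
  match o with
  | none => false
  | some v => r == v

def solution_alt (rank : List Int) (attendance : List Bool) : Int :=
  let tri := (PySem.List.enumerate attendance 0).foldl
    (fun s p => if p.2 == true then pvStep s (PySem.List.pyGetD rank p.1 0) else s)
    (none, none, none)
  let ps := (PySem.List.enumerate rank 0).foldl
    (fun (ps : List Int × List Int × List Int) q =>
      (if pvIsReg tri.1 q.2 then ps.1 ++ [q.1] else ps.1,
       if pvIsReg tri.2.1 q.2 then ps.2.1 ++ [q.1] else ps.2.1,
       if pvIsReg tri.2.2 q.2 then ps.2.2 ++ [q.1] else ps.2.2))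
    ([], [], [])
  let out := ps.1 ++ ps.2.1 ++ ps.2.2
  -- Python subscripts out[0]/out[1]/out[2], raising IndexError exactly where A does
  PySem.List.pyGetD out 0 0 * 10000 + PySem.List.pyGetD out 1 0 * 100 + PySem.List.pyGetD out 2 0

-- ===== PRECONDITION & SPEC =====
-- Pre_ excludes exactly the inputs on which Python A raises: an attending position beyond rank
-- (IndexError on rank[idx]), or fewer than three recovered indices — the occurrence counts of the
-- attending rank values sum to less than 3 (IndexError on temp2[2]). Python B raises on exactly
-- the same inputs.
def Pre_solution (rank : List Int) (attendance : List Bool) : Prop :=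
  (∀ b ∈ attendance.drop rank.length, b = false) ∧
  3 ≤ (((rank.zip attendance).filterMap
        (fun p => if p.2 = true then some p.1 else none)).map (fun v => rank.count v)).sum
instance (rank : List Int) (attendance : List Bool) : Decidable (Pre_solution rank attendance) := by
  unfold Pre_solution; infer_instance

def pvWitness_solution : List Int × List Bool := ([1, 2, 3, 4], [true, true, true, false])

def Spec_solution (rank : List Int) (attendance : List Bool) (out : Int) : Prop := out = solution_alt rank attendance
instance (rank : List Int) (attendance : List Bool) (out : Int) : Decidable (Spec_solution rank attendance out) := by unfold Spec_solution; infer_instance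

-- ===== CLAIM (what is proved, stated in full; the proofs are below) =====
def Claim_equal_solution : Prop := ∀ (rank : List Int) (attendance : List Bool), Dom_solution rank attendance → Pre_solution rank attendance → Spec_solution rank attendance (solution rank attendance)

-- ===== LEMMAS AND PROOFS =====

-- proof-side abbreviations
def pvKey (rank : List Int) (i : Int) : Int := PySem.List.pyGetD rank i 0

-- all positions of value v in rank, as A's inner loop enumerates them
def pvPos (rank : List Int) (v : Int) : List Int :=
  (PySem.List.pyRange 0 (rank.length : Int) 1).filter (fun j => v == PySem.List.pyGetD rank j 0)

-- the positions a register contributes: none contributes nothing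
def pvPosOf (rank : List Int) : Option Int → List Int
  | none => []
  | some v => pvPos rank v

-- insertion of a value below the first strictly larger element, matching pvStep's comparisons
def pvIns (c : Int) : List Int → List Int
  | [] => [c]
  | x :: xs => if c < x then c :: x :: xs else x :: pvIns c xs

-- the first three elements of a list, as B's three registers
def pvTrip (l : List Int) : Option Int × Option Int × Option Int :=
  (l[0]?, l[1]?, l[2]?)

-- A's first loop: appending then re-sorting each kept value is sorting all kept values at once
theorem pvTempLoop (rank : List Int) (ps : List (Int × Bool)) (xs : List Int) :
    ps.foldl (fun temp p =>
        if p.2 == true then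
          PySem.List.sorted (temp ++ [PySem.List.pyGetD rank p.1 0]) (fun x => x) false
        else temp) (PySem.List.sorted xs (fun x => x) false)
      = PySem.List.sorted
          (xs ++ (ps.filterMap (fun p => if p.2 == true then some p.1 else none)).map (pvKey rank))
          (fun x => x) false := by
  induction ps generalizing xs with
  | nil => simp
  | cons p ps ih =>
    obtain ⟨i, b⟩ := p
    cases b with
    | false => simpa using ih xs
    | true =>
      simp only [List.foldl_cons, List.filterMap_cons]
      have hperm : (PySem.List.sorted xs (fun x => x) false ++ [PySem.List.pyGetD rank i 0]).Perm
          (xs ++ [PySem.List.pyGetD rank i 0]) :=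
        (PySem.List.sorted_perm xs (fun x => x) false).append_right _
      have h1 : PySem.List.sorted (PySem.List.sorted xs (fun x => x) false ++ [PySem.List.pyGetD rank i 0]) (fun x => x) false
          = PySem.List.sorted (xs ++ [PySem.List.pyGetD rank i 0]) (fun x => x) false :=
        PySem.List.sorted_eq_sorted_of_perm _ _ _ (fun a b h => h) hperm
      simp only [BEq.rfl, if_pos, h1]
      rw [ih (xs ++ [PySem.List.pyGetD rank i 0])]
      simp [pvKey, List.map_cons, List.append_assoc]

-- A's second loop: the nested back-search appends, per value, exactly its positions in rank
theorem pvOuter (rank : List Int) (cs : List Int) (t2 : List Int) :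
    cs.foldl (fun t2 v =>
        (PySem.List.pyRange 0 (rank.length : Int) 1).foldl
          (fun t2 j => if v == PySem.List.pyGetD rank j 0 then t2 ++ [j] else t2) t2) t2
      = t2 ++ cs.flatMap (pvPos rank) := by
  induction cs generalizing t2 with
  | nil => simp
  | cons c cs ih =>
    simp only [List.foldl_cons]
    rw [PySem.List.foldl_append_if (fun j => c == PySem.List.pyGetD rank j 0) (fun j => j)]
    rw [ih]
    simp [pvPos, List.append_assoc]

-- B's first loop skips non-attending positions: fold over the kept values only
theorem pvFoldFilterB (rank : List Int) (l : List (Int × Bool))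
    (s : Option Int × Option Int × Option Int) :
    l.foldl (fun s p => if p.2 == true then pvStep s (PySem.List.pyGetD rank p.1 0) else s) s
      = (l.filterMap (fun p => if p.2 == true then some p.1 else none)).foldl
          (fun s i => pvStep s (PySem.List.pyGetD rank i 0)) s := by
  induction l generalizing s with
  | nil => rfl
  | cons p l ih =>
    obtain ⟨i, b⟩ := p
    cases b with
    | false => simpa using ih s
    | true => simpa using ih (pvStep s (PySem.List.pyGetD rank i 0))

-- one register update is one sorted insertion, seen through the first three elements
theorem pvStepTrip (l : List Int) (c : Int) :
    pvStep (pvTrip l) c = pvTrip (pvIns c l) := by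
  rcases l with _ | ⟨a, _ | ⟨b, _ | ⟨d, rest⟩⟩⟩ <;>
    simp only [pvStep, pvTrip, pvIns] <;> split_ifs <;> simp_all

-- B's whole first loop is the first three elements of a fold of sorted insertions
theorem pvFoldTrip (cs : List Int) (l : List Int) :
    cs.foldl pvStep (pvTrip l) = pvTrip (cs.foldl (fun acc c => pvIns c acc) l) := by
  induction cs generalizing l with
  | nil => rfl
  | cons c cs ih => rw [List.foldl_cons, List.foldl_cons, pvStepTrip, ih]

theorem pvInsPerm (c : Int) (l : List Int) : (pvIns c l).Perm (c :: l) := by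
  induction l with
  | nil => simp [pvIns]
  | cons x xs ih =>
    simp only [pvIns]
    split_ifs
    · exact List.Perm.refl _
    · exact (ih.cons x).trans (List.Perm.swap c x xs)

theorem pvMemIns (c y : Int) (l : List Int) : y ∈ pvIns c l ↔ y = c ∨ y ∈ l := by
  rw [(pvInsPerm c l).mem_iff]; simp

theorem pvInsPairwise (c : Int) (l : List Int) (hp : l.Pairwise (· ≤ ·)) :
    (pvIns c l).Pairwise (· ≤ ·) := by
  induction l with
  | nil => simp [pvIns]
  | cons x xs ih =>
    simp only [pvIns]
    obtain ⟨hx, hxs⟩ := List.pairwise_cons.mp hp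
    split_ifs with hc
    · refine List.pairwise_cons.mpr ⟨?_, hp⟩
      intro y hy
      rcases List.mem_cons.mp hy with rfl | hy
      · omega
      · have := hx y hy
        omega
    · refine List.pairwise_cons.mpr ⟨?_, ih hxs⟩
      intro y hy
      rcases (pvMemIns c y xs).mp hy with rfl | hy
      · omega
      · exact hx y hy

theorem pvSortFold (cs : List Int) (l : List Int) (hp : l.Pairwise (· ≤ ·)) :
    (cs.foldl (fun acc c => pvIns c acc) l).Perm (l ++ cs) ∧
      (cs.foldl (fun acc c => pvIns c acc) l).Pairwise (· ≤ ·) := by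
  induction cs generalizing l with
  | nil =>
    simp only [List.foldl_nil, List.append_nil]
    exact ⟨List.Perm.refl l, hp⟩
  | cons c cs ih =>
    simp only [List.foldl_cons]
    have hperm1 : (pvIns c l ++ cs).Perm (l ++ c :: cs) :=
      ((pvInsPerm c l).append_right cs).trans List.perm_middle.symm
    have := ih (pvIns c l) (pvInsPairwise c l hp)
    exact ⟨this.1.trans hperm1, this.2⟩

-- B's second loop acts on the three buckets independently
theorem pvTripleFold (o1 o2 o3 : Option Int) (l : List (Int × Int)) (a b c : List Int) :
    l.foldl (fun (ps : List Int × List Int × List Int) q =>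
        (if pvIsReg o1 q.2 then ps.1 ++ [q.1] else ps.1,
         if pvIsReg o2 q.2 then ps.2.1 ++ [q.1] else ps.2.1,
         if pvIsReg o3 q.2 then ps.2.2 ++ [q.1] else ps.2.2)) (a, b, c)
      = (l.foldl (fun acc q => if pvIsReg o1 q.2 then acc ++ [q.1] else acc) a,
         l.foldl (fun acc q => if pvIsReg o2 q.2 then acc ++ [q.1] else acc) b,
         l.foldl (fun acc q => if pvIsReg o3 q.2 then acc ++ [q.1] else acc) c) := by
  induction l generalizing a b c with
  | nil => rfl
  | cons x l ih =>
    simp only [List.foldl_cons]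
    exact ih _ _ _

-- one bucket of B's sweep collects exactly the register's positions in rank
theorem pvBucket (rank : List Int) (o : Option Int) (acc : List Int) :
    (PySem.List.enumerate rank 0).foldl
        (fun acc q => if pvIsReg o q.2 then acc ++ [q.1] else acc) acc
      = acc ++ pvPosOf rank o := by
  cases o with
  | none =>
    have h : ∀ (l : List (Int × Int)) (acc : List Int),
        l.foldl (fun acc q => if pvIsReg none q.2 then acc ++ [q.1] else acc) acc = acc := by
      intro l
      induction l with
      | nil => intro acc; rfl
      | cons x l ih => intro acc; simpa [pvIsReg] using ih acc
    simp [pvPosOf, h]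
  | some v =>
    rw [PySem.List.foldl_append_if (fun q => pvIsReg (some v) q.2) (fun q : Int × Int => q.1)]
    congr 1
    rw [PySem.List.enumerate_eq_map_pyRange rank 0]
    simp only [PySem.List.len]
    rw [List.filter_map, List.map_map]
    simp only [pvPosOf, pvPos]
    have hcong : ∀ j ∈ PySem.List.pyRange 0 (rank.length : Int) 1,
        ((fun q : Int × Int => pvIsReg (some v) q.2) ∘ fun j => (j, PySem.List.pyGetD rank j 0)) j
          = (v == PySem.List.pyGetD rank j 0) := by
      intro j _
      simp [pvIsReg, Function.comp, eq_comm]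
    rw [List.filter_congr hcong]
    simp [Function.comp_def]

-- the first three values' position lists, concatenated, are the buckets of the three registers
theorem pvConcat (rank : List Int) (sp : List Int) :
    (sp.take 3).flatMap (pvPos rank)
      = pvPosOf rank sp[0]? ++ pvPosOf rank sp[1]? ++ pvPosOf rank sp[2]? := by
  rcases sp with _ | ⟨a, _ | ⟨b, _ | ⟨c, rest⟩⟩⟩ <;> simp [pvPosOf]

-- ===== VERDICT (by name: the statement is the Claim_ definition above) =====
theorem solution_spec : Claim_equal_solution := by
  intro rank attendance _ _
  unfold Spec_solution solution solution_alt
  dsimp only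
  have htemp := pvTempLoop rank (PySem.List.enumerate attendance 0) []
  simp only [List.nil_append] at htemp
  rw [show PySem.List.sorted ([] : List Int) (fun x => x) false = [] from rfl] at htemp
  rw [htemp, pvFoldFilterB]
  set idxs := (PySem.List.enumerate attendance 0).filterMap
      (fun p => if p.2 == true then some p.1 else none) with hidxs
  set vs := idxs.map (pvKey rank) with hvs
  -- B's registers hold the first three elements of the insertion fold
  have hreg : idxs.foldl (fun s i => pvStep s (PySem.List.pyGetD rank i 0)) (pvTrip [])
      = pvTrip (vs.foldl (fun acc c => pvIns c acc) []) := by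
    have h1 : vs.foldl pvStep (pvTrip []) =
        idxs.foldl (fun s i => pvStep s (PySem.List.pyGetD rank i 0)) (pvTrip []) := by
      rw [hvs, List.foldl_map]
      rfl
    rw [← h1, pvFoldTrip]
  rw [show ((none, none, none) : Option Int × Option Int × Option Int) = pvTrip [] from rfl, hreg]
  set sp := vs.foldl (fun acc c => pvIns c acc) [] with hsp
  obtain ⟨hperm, hpw⟩ := pvSortFold vs [] List.Pairwise.nil
  simp only [List.nil_append] at hperm
  -- A's sorted list is the insertion fold: both are ≤-sorted rearrangements of vs
  have hsorted : PySem.List.sorted vs (fun x => x) false = sp := by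
    exact PySem.List.sorted_id_eq_of_perm_of_pairwise _ _ hperm hpw
  rw [hsorted]
  rw [PySem.List.slice_to _ (by norm_num : (0 : Int) ≤ 3)]
  rw [pvOuter]
  simp only [List.nil_append]
  -- B's sweep fills the three buckets with the registers' positions
  rw [pvTripleFold, pvBucket, pvBucket, pvBucket]
  simp only [List.nil_append]
  -- both programs now read the same concatenation of position lists
  rw [show ((3 : Int)).toNat = 3 from rfl, pvConcat]
  simp only [pvTrip]
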